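-- pv_equiv track=rewrite | github.com/jzbjyb/supervised-oie | supervised-oie-benchmark/qa_to_oie.py | consolidate_answers
-- ===== SOURCE A (Python) =====
-- import itertools
-- import itertools
--
-- def consolidate_answers(answers):
--     ret = []
--     for i, first_answer in enumerate(answers):
--         includeFlag = True
--         for j, second_answer in enumerate(answers):
--             if (i != j) and (is_str_subset(second_answer, first_answer)) :
--                 includeFlag = False
--                 continue
--         if includeFlag:
--             ret.append(first_answer)
--     return ret
--
-- def is_str_subset(s1, s2):
--     """ returns true iff the words in string s1 are contained in string s2 in the same order by which they appear in s2 """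
--     all_indices = [find_all_indices(s2.split(" "), x) for x in s1.split()]
--     if not all(all_indices):
--         return False
--     for combination in itertools.product(*all_indices):
--         if strictly_increasing(combination):
--             return True
--     return False
--
-- def find_all_indices(ls, elem):
--     return  [i for i,x in enumerate(ls) if x == elem]
--
-- def strictly_increasing(L):
--     return all(x<y for x, y in zip(L, L[1:]))
-- ===== SOURCE B (Python) =====
-- def is_subseq(xs, ys):
--     """Greedy two-pointer: True iff xs is a subsequence of ys."""
--     i = 0
--     for y in ys:
--         if i < len(xs) and xs[i] == y:
--             i += 1
--     return i == len(xs)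
--
-- def consolidate_answers(answers):
--     words = [a.split() for a in answers]
--     return [a for i, a in enumerate(answers)
--             if not any(j != i and is_subseq(w, a.split(" "))
--                        for j, w in enumerate(words))]
-- ===== Notes on version B (the rewrite author's own statement) =====
-- stated objective: faster
-- what changed: The word-subsequence test is done by a single greedy two-pointer scan instead of enumerating all combinations of word positions with itertools.product, and each answer's word list is split once up front.
import Mathlib
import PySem

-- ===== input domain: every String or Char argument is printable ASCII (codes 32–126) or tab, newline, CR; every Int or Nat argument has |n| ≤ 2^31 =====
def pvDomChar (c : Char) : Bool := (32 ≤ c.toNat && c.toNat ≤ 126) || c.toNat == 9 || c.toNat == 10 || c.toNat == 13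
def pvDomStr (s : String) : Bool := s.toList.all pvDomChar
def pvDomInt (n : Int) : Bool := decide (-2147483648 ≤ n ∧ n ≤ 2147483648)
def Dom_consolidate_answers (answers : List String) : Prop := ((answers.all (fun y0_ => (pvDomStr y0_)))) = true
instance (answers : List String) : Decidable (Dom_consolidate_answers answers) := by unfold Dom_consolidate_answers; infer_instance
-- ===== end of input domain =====

-- B replaces A's itertools.product search over all index combinations by a greedy
-- two-pointer subsequence check (objective: faster, asymptotic).

-- shared port of `.split(" ")` (both Pythons call it verbatim); split? is `some` here since the separator " " ≠ ""
def pySplitSpace (s : String) : List String := (PySem.Str.split? s " ").getD []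

-- ===== PORT A =====
def findAllIndices (ls : List String) (elem : String) : List Int :=
  ((PySem.List.enumerate ls).filter (fun p => p.2 == elem)).map (fun p => p.1)

def strictlyIncreasing (L : List Int) : Bool :=
  (L.zip (PySem.List.slice L (some 1) none)).all (fun p => p.1 < p.2)

-- itertools.product(*lss) as a list of combinations
def pyProduct (lss : List (List Int)) : List (List Int) :=
  lss.foldr (fun ls acc => ls.flatMap (fun x => acc.map (fun c => x :: c))) [[]]

def is_str_subset (s1 s2 : String) : Bool :=
  let allIndices := (PySem.Str.split₀ s1).map (fun x => findAllIndices (pySplitSpace s2) x)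
  if ¬ (allIndices.all (fun l => !l.isEmpty)) then false
  else (pyProduct allIndices).any strictlyIncreasing

def consolidate_answers (answers : List String) : List String :=
  (PySem.List.enumerate answers).foldl
    (fun ret p =>
      let includeFlag := (PySem.List.enumerate answers).foldl
        (fun flag q => if ((p.1 != q.1) && is_str_subset q.2 p.2) = true then false else flag) true
      if includeFlag then ret ++ [p.2] else ret) []

-- ===== PORT B =====
def isSubseq (xs ys : List String) : Bool :=
  (ys.foldl (fun i y => if i < xs.length ∧ xs.getD i "" = y then i + 1 else i) 0) == xs.length

def consolidate_answers_alt (answers : List String) : List String :=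
  let words := answers.map (fun a => PySem.Str.split₀ a)
  ((PySem.List.enumerate answers).filter (fun p =>
      !((PySem.List.enumerate words).any
          (fun q => (q.1 != p.1) && isSubseq q.2 (pySplitSpace p.2))))).map (fun p => p.2)

-- ===== PRECONDITION & SPEC =====
def Spec_consolidate_answers (answers : List String) (out : List String) : Prop := out = consolidate_answers_alt answers
instance (answers : List String) (out : List String) : Decidable (Spec_consolidate_answers answers out) := by unfold Spec_consolidate_answers; infer_instance

-- ===== CLAIM (what is proved, stated in full; the proofs are below) =====
def Claim_equal_consolidate_answers : Prop := ∀ (answers : List String), Dom_consolidate_answers answers → Spec_consolidate_answers answers (consolidate_answers answers)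

-- ===== LEMMAS AND PROOFS =====

-- proof-side recursive greedy matcher (number of words of xs greedily matched in ys)
def grec : List String → List String → Nat
  | _, [] => 0
  | [], _ :: _ => 0
  | x :: xs', y :: ys => if x = y then grec xs' ys + 1 else grec (x :: xs') ys

lemma grec_eq_iff (ys xs : List String) : grec xs ys = xs.length ↔ xs.Sublist ys := by
  induction ys generalizing xs with
  | nil =>
    cases xs with
    | nil => simp [grec]
    | cons x xs' => simp [grec]
  | cons y ys ih =>
    cases xs with
    | nil => simp [grec]
    | cons x xs' =>
      by_cases h : x = y
      · subst h
        rw [show grec (x :: xs') (x :: ys) = grec xs' ys + 1 from by simp [grec]]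
        rw [List.length_cons, Nat.add_right_cancel_iff, ih, List.cons_sublist_cons]
      · rw [show grec (x :: xs') (y :: ys) = grec (x :: xs') ys from by simp [grec, h]]
        rw [ih]
        constructor
        · exact fun hs => hs.trans (List.sublist_cons_self y ys)
        · intro hs
          cases hs with
          | cons _ hs => exact hs
          | cons₂ => exact absurd rfl h

lemma foldl_counter (xs : List String) :
    ∀ (ys : List String) (i : Nat), i ≤ xs.length →
      ys.foldl (fun i y => if i < xs.length ∧ xs.getD i "" = y then i + 1 else i) i
        = i + grec (List.drop i xs) ys := by
  intro ys
  induction ys with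
  | nil => intro i _; rw [List.foldl_nil]; cases h : List.drop i xs <;> simp [grec]
  | cons y ys ih =>
    intro i hi
    rw [List.foldl_cons]
    rcases lt_or_eq_of_le hi with hlt | heq
    · have hdrop : List.drop i xs = xs[i] :: List.drop (i + 1) xs :=
        (List.getElem_cons_drop hlt).symm
      have hgetD : xs.getD i "" = xs[i] := List.getD_eq_getElem xs "" hlt
      by_cases h : xs[i] = y
      · rw [show (if i < xs.length ∧ xs.getD i "" = y then i + 1 else i) = i + 1
            from if_pos ⟨hlt, by rw [hgetD, h]⟩]
        rw [ih (i + 1) hlt, hdrop]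
        rw [show grec (xs[i] :: List.drop (i + 1) xs) (y :: ys)
              = grec (List.drop (i + 1) xs) ys + 1 from by simp [grec, h]]
        omega
      · rw [show (if i < xs.length ∧ xs.getD i "" = y then i + 1 else i) = i
            from if_neg (fun hc => h (hgetD ▸ hc.2))]
        rw [ih i hi, hdrop]
        rw [show grec (xs[i] :: List.drop (i + 1) xs) (y :: ys)
              = grec (xs[i] :: List.drop (i + 1) xs) ys from by simp [grec, h]]
    · subst heq
      rw [show (if xs.length < xs.length ∧ xs.getD xs.length "" = y then xs.length + 1
            else xs.length) = xs.length from if_neg (fun hc => absurd hc.1 (lt_irrefl _))]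
      rw [ih xs.length hi]
      rw [List.drop_length]
      cases ys <;> simp [grec]

lemma isSubseq_iff (xs ys : List String) : isSubseq xs ys = true ↔ xs.Sublist ys := by
  unfold isSubseq
  rw [foldl_counter xs ys 0 (Nat.zero_le _)]
  simp only [Nat.zero_add, List.drop_zero, beq_iff_eq]
  exact grec_eq_iff ys xs

lemma mem_enumerate {α : Type} (p : Int × α) :
    ∀ (ls : List α) (s : Int),
      p ∈ PySem.List.enumerate ls s ↔ ∃ k : Nat, ls[k]? = some p.2 ∧ p.1 = s + k := by
  intro ls
  induction ls with
  | nil => intro s; simp [PySem.List.enumerate_nil]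
  | cons x t ih =>
    intro s
    rw [PySem.List.enumerate_cons, List.mem_cons, ih (s + 1)]
    constructor
    · rintro (rfl | ⟨k, hk, hp⟩)
      · exact ⟨0, by simp, by simp⟩
      · exact ⟨k + 1, by simpa using hk, by rw [hp]; push_cast; ring⟩
    · rintro ⟨k, hk, hp⟩
      cases k with
      | zero =>
        left
        have h2 : x = p.2 := by simpa using hk
        have h1 : p.1 = s := by simpa using hp
        exact Prod.ext h1 h2.symm
      | succ k =>
        right
        exact ⟨k, by simpa using hk, by rw [hp]; push_cast; ring⟩

lemma mem_findAllIndices (ls : List String) (w : String) (i : Int) :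
    i ∈ findAllIndices ls w ↔ ∃ k : Nat, ls[k]? = some w ∧ i = (k : Int) := by
  unfold findAllIndices
  rw [List.mem_map]
  constructor
  · rintro ⟨p, hp, rfl⟩
    rw [List.mem_filter] at hp
    obtain ⟨hpe, hpw⟩ := hp
    rw [mem_enumerate] at hpe
    obtain ⟨k, hk, hp1⟩ := hpe
    have hw : p.2 = w := by simpa using hpw
    exact ⟨k, by rw [← hw]; exact hk, by rw [hp1]; simp⟩
  · rintro ⟨k, hk, rfl⟩
    refine ⟨((k : Int), w), ?_, rfl⟩
    rw [List.mem_filter, mem_enumerate]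
    exact ⟨⟨k, by simpa using hk, by simp⟩, by simp⟩

lemma strictlyIncreasing_iff (L : List Int) :
    strictlyIncreasing L = true ↔ L.Pairwise (· < ·) := by
  unfold strictlyIncreasing
  rw [PySem.List.slice_from_one]
  induction L with
  | nil => simp
  | cons x t ih =>
    cases t with
    | nil => simp
    | cons y r =>
      simp only [List.tail_cons, List.zip_cons_cons, List.all_cons, Bool.and_eq_true,
        decide_eq_true_eq] at ih ⊢
      rw [List.pairwise_cons_cons_iff_of_trans]
      exact and_congr_right (fun _ => ih)

lemma mem_pyProduct (lss : List (List Int)) (c : List Int) :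
    c ∈ pyProduct lss ↔ List.Forall₂ (fun x l => x ∈ l) c lss := by
  induction lss generalizing c with
  | nil => simp [pyProduct, List.forall₂_nil_right_iff]
  | cons ls lss ih =>
    simp only [pyProduct, List.foldr_cons, List.mem_flatMap, List.mem_map,
      List.forall₂_cons_right_iff]
    constructor
    · rintro ⟨x, hx, c', hc', rfl⟩
      exact ⟨x, c', hx, (ih c').mp hc', rfl⟩
    · rintro ⟨x, c', hx, hc', rfl⟩
      exact ⟨x, hx, c', (ih c').mpr hc', rfl⟩

-- core of the A-side: an increasing choice of valid indices exists iff ws1 is a subsequence of ws2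
lemma forall2_nat_sublist (ws2 : List String) (c : List Nat) (ws1 : List String)
    (h : List.Forall₂ (fun k w => ws2[k]? = some w) c ws1) (hp : c.Pairwise (· < ·)) :
    ws1.Sublist ws2 := by
  have hlt : ∀ k ∈ c, k < ws2.length := by
    intro k hk
    obtain ⟨j, hj, rfl⟩ := List.mem_iff_getElem.mp hk
    obtain ⟨hlen, hget⟩ := List.forall₂_iff_get.mp h
    have hg := hget j hj (by omega)
    have := (List.getElem?_eq_some_iff.mp hg).1
    simpa using this
  have his : List.Pairwise (fun a b => a < b)
      (c.pmap (fun k hk => (⟨k, hk⟩ : Fin ws2.length)) hlt) :=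
    hp.pmap hlt (by intro x hx y hy hxy; exact Fin.mk_lt_mk.mpr hxy)
  have hmap : (c.pmap (fun k hk => (⟨k, hk⟩ : Fin ws2.length)) hlt).map
      (fun x => ws2[x]) = ws1 := by
    obtain ⟨hlen, hget⟩ := List.forall₂_iff_get.mp h
    apply List.ext_getElem
    · simp [hlen]
    · intro j h1 h2
      simp only [List.getElem_map, List.getElem_pmap]
      have hg := hget j (by simpa using h1) h2
      rw [List.getElem?_eq_some_iff] at hg
      obtain ⟨_, hh⟩ := hg
      simpa using hh
  exact hmap ▸ List.map_getElem_sublist his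

lemma product_any_iff (ws1 ws2 : List String) :
    (pyProduct (ws1.map (fun x => findAllIndices ws2 x))).any strictlyIncreasing = true
      ↔ ws1.Sublist ws2 := by
  rw [List.any_eq_true]
  constructor
  · rintro ⟨c, hc, hinc⟩
    rw [mem_pyProduct] at hc
    rw [strictlyIncreasing_iff] at hinc
    rw [List.forall₂_map_right_iff] at hc
    have hc' : List.Forall₂ (fun (x : Int) w => ∃ k : Nat, ws2[k]? = some w ∧ x = (k : Int))
        c ws1 := hc.imp (fun _ _ hx => (mem_findAllIndices _ _ _).mp hx)
    have h2 : List.Forall₂ (fun (k : Nat) w => ws2[k]? = some w) (c.map Int.toNat) ws1 := by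
      rw [List.forall₂_map_left_iff]
      exact hc'.imp (by rintro a b ⟨k, hk, rfl⟩; simpa using hk)
    have hnn : ∀ x ∈ c, (0 : Int) ≤ x := by
      intro x hx
      obtain ⟨j, hj, rfl⟩ := List.mem_iff_getElem.mp hx
      obtain ⟨hlen, hget⟩ := List.forall₂_iff_get.mp hc'
      obtain ⟨k, _, hk⟩ := hget j hj (by omega)
      simp only [List.get_eq_getElem] at hk
      rw [hk]
      positivity
    have hp2 : (c.map Int.toNat).Pairwise (· < ·) := by
      rw [List.pairwise_map]
      refine hinc.imp_of_mem ?_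
      intro a b ha hb hab
      have h0 := hnn a ha
      omega
    exact forall2_nat_sublist ws2 _ ws1 h2 hp2
  · intro hs
    obtain ⟨is, heq, hp⟩ := List.sublist_eq_map_getElem hs
    refine ⟨is.map (fun f => Int.ofNat f.val), ?_, ?_⟩
    · rw [mem_pyProduct, heq]
      clear heq hs hp
      induction is with
      | nil => simp
      | cons f t ih =>
        simp only [List.map_cons]
        exact List.Forall₂.cons
          ((mem_findAllIndices _ _ _).mpr ⟨f.val, List.getElem?_eq_getElem f.2, rfl⟩) ih
    · rw [strictlyIncreasing_iff]
      refine List.pairwise_map.mpr ?_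
      exact List.Pairwise.imp (fun hab => Int.ofNat_lt.mpr hab) hp

lemma is_str_subset_iff (s1 s2 : String) :
    is_str_subset s1 s2 = true ↔ (PySem.Str.split₀ s1).Sublist (pySplitSpace s2) := by
  rw [show is_str_subset s1 s2
      = (if ¬ ((((PySem.Str.split₀ s1).map (fun x => findAllIndices (pySplitSpace s2) x)).all
            (fun l => !l.isEmpty)) = true)
         then false
         else (pyProduct ((PySem.Str.split₀ s1).map
                (fun x => findAllIndices (pySplitSpace s2) x))).any strictlyIncreasing)
      from rfl]
  by_cases hg : (((PySem.Str.split₀ s1).map (fun x => findAllIndices (pySplitSpace s2) x)).all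
      (fun l => !l.isEmpty)) = true
  · rw [if_neg (not_not_intro hg)]
    exact product_any_iff _ _
  · rw [if_pos hg]
    simp only [Bool.false_eq_true, false_iff]
    intro hs
    apply hg
    rw [List.all_eq_true]
    intro l hl
    rw [List.mem_map] at hl
    obtain ⟨w, hw, rfl⟩ := hl
    have hmem : w ∈ pySplitSpace s2 := hs.subset hw
    obtain ⟨j, hj, hwj⟩ := List.mem_iff_getElem.mp hmem
    have hne : (j : Int) ∈ findAllIndices (pySplitSpace s2) w :=
      (mem_findAllIndices _ _ _).mpr ⟨j, by rw [List.getElem?_eq_getElem hj, hwj], rfl⟩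
    cases hfa : findAllIndices (pySplitSpace s2) w with
    | nil => rw [hfa] at hne; simp at hne
    | cons a t => simp

-- A's inner flag-loop is the negated `any`
lemma inner_flag_eq (answers : List String) (p : Int × String) :
    (PySem.List.enumerate answers).foldl
        (fun flag q => if ((p.1 != q.1) && is_str_subset q.2 p.2) = true then false else flag) true
      = !((PySem.List.enumerate answers).any
            (fun q => (p.1 != q.1) && is_str_subset q.2 p.2)) := by
  rw [PySem.List.foldl_if_false_eq]
  simp

-- enumerate commutes with map (needed because B enumerates the pre-split word lists)
lemma enumerate_map {α β : Type} (f : α → β) :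
    ∀ (l : List α) (s : Int),
      PySem.List.enumerate (l.map f) s
        = (PySem.List.enumerate l s).map (fun p => (p.1, f p.2)) := by
  intro l
  induction l with
  | nil => intro s; simp [PySem.List.enumerate_nil]
  | cons x t ih => intro s; simp [PySem.List.enumerate_cons, ih (s + 1)]

lemma bne_comm_int (a b : Int) : (a != b) = (b != a) := by
  by_cases h : a = b
  · rw [h]
  · rw [show (a != b) = true from bne_iff_ne.mpr h,
      show (b != a) = true from bne_iff_ne.mpr (Ne.symm h)]

lemma elementwise_eq (s1 s2 : String) :
    is_str_subset s1 s2 = isSubseq (PySem.Str.split₀ s1) (pySplitSpace s2) := by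
  have h1 := is_str_subset_iff s1 s2
  have h2 := isSubseq_iff (PySem.Str.split₀ s1) (pySplitSpace s2)
  cases ha : is_str_subset s1 s2 <;>
    cases hb : isSubseq (PySem.Str.split₀ s1) (pySplitSpace s2) <;> simp_all

-- ===== VERDICT (by name: the statement is the Claim_ definition above) =====
theorem consolidate_answers_spec : Claim_equal_consolidate_answers := by
  intro answers _
  unfold Spec_consolidate_answers consolidate_answers consolidate_answers_alt
  simp only [inner_flag_eq]
  simp only [PySem.List.foldl_append_if, List.nil_append]
  apply congrArg
  apply List.filter_congr
  intro p hp
  rw [enumerate_map, List.any_map]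
  apply congrArg
  apply PySem.List.any_congr_mem
  intro q hq
  simp only [Function.comp]
  rw [elementwise_eq q.2 p.2, bne_comm_int]
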